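-- pv_equiv track=rewrite | github.com/xuxin2023/gas_calibrator | src/gas_calibrator/v2/qc/qc_report.py | _route_decision_breakdown
-- ===== SOURCE A (Python) =====
-- from typing import Any, Optional
--
-- def _route_decision_breakdown(point_details: list[dict[str, Any]]) -> dict[str, dict[str, int]]:
--     rows: dict[str, dict[str, int]] = {}
--     for detail in list(point_details or []):
--         route = str(detail.get("route") or "--").strip() or "--"
--         counts = rows.setdefault(route, {"pass": 0, "warn": 0, "reject": 0, "skipped": 0})
--         level = str(detail.get("result_level") or "reject").strip().lower()
--         if level not in counts:
--             level = "reject"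
--         counts[level] += 1
--     return {route: dict(rows[route]) for route in sorted(rows)}
-- ===== SOURCE B (Python) =====
-- from typing import Any, Optional
--
-- _LEVELS = ("pass", "warn", "reject", "skipped")
--
-- def _norm(detail: dict) -> tuple:
--     route = str(detail.get("route") or "--").strip() or "--"
--     level = str(detail.get("result_level") or "reject").strip().lower()
--     return route, (level if level in _LEVELS else "reject")
--
-- def _route_decision_breakdown(point_details: list[dict[str, Any]]) -> dict[str, dict[str, int]]:
--     pairs = sorted((_norm(d) for d in (point_details or [])), key=lambda p: p[0])
--     out = {}
--     i, n = 0, len(pairs)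
--     while i < n:
--         j = i
--         while j < n and pairs[j][0] == pairs[i][0]:
--             j += 1
--         lvls = [lvl for _, lvl in pairs[i:j]]
--         out[pairs[i][0]] = {k: lvls.count(k) for k in _LEVELS}
--         i = j
--     return out
-- ===== Notes on version B (the rewrite author's own statement) =====
-- stated objective: alternative
-- what changed: A builds a mutable dict-of-dicts incrementally (setdefault + in-place increment per detail) and sorts its keys at the end; B is a staged pipeline: normalize every detail to a (route, level) pair, sort the pairs by route, split the sorted list into runs of equal route, and count the four levels inside each run.
import Mathlib
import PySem

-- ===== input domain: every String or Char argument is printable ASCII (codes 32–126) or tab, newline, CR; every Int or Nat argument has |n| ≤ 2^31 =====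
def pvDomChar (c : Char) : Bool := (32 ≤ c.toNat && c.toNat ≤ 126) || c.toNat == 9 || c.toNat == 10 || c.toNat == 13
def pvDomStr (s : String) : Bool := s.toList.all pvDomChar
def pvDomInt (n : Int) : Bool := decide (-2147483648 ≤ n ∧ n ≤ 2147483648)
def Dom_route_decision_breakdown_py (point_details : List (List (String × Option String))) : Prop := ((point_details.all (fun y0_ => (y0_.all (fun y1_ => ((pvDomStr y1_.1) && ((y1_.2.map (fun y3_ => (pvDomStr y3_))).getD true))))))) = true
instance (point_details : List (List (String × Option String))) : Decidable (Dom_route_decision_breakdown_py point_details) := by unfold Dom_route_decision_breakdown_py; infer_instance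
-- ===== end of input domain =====

-- B replaces A's incrementally-updated dict-of-dicts by a staged pipeline: normalize each
-- detail to a (route, level) pair, sort the pairs by route, split the sorted list into
-- runs of equal route, and count the four levels inside each run (alternative decomposition).

-- ===== PORT A =====
-- {"pass": 0, "warn": 0, "reject": 0, "skipped": 0}
def pvDefault4 : PySem.Dict String Int :=
  PySem.Dict.mk [("pass", 0), ("warn", 0), ("reject", 0), ("skipped", 0)]

-- the body of A's for-loop, verbatim
def pvLoopBody (rows : PySem.Dict String (PySem.Dict String Int))
    (detail : List (String × Option String)) : PySem.Dict String (PySem.Dict String Int) :=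
  let d := PySem.Dict.mk detail
  -- route = str(detail.get("route") or "--").strip() or "--"
  let route0 := match (d.get? "route").join with
    | some v => if v = "" then "--" else v
    | none => "--"
  let route1 := PySem.Str.strip route0
  let route := if route1 = "" then "--" else route1
  -- counts = rows.setdefault(route, {...})   (counts aliases rows[route])
  let rows := rows.setdefault route pvDefault4
  let counts := rows.getD route pvDefault4
  -- level = str(detail.get("result_level") or "reject").strip().lower()
  let level0 := match (d.get? "result_level").join with
    | some v => if v = "" then "reject" else v
    | none => "reject"
  let level1 := PySem.Str.lower (PySem.Str.strip level0)
  -- if level not in counts: level = "reject"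
  let level := if counts.contains level1 then level1 else "reject"
  -- counts[level] += 1  (writes through to rows[route])
  rows.insert route (counts.insert level (counts.getD level 0 + 1))

def route_decision_breakdown_py (point_details : List (List (String × Option String))) : List (String × List (String × Int)) :=
  let rows : PySem.Dict String (PySem.Dict String Int) :=
    point_details.foldl pvLoopBody PySem.Dict.empty
  -- {route: dict(rows[route]) for route in sorted(rows)}
  (PySem.List.sorted rows.keys (fun x => x) false).map
    (fun route => (route, (rows.getD route PySem.Dict.empty).items))

-- ===== PORT B =====
def bLevels : List String := ["pass", "warn", "reject", "skipped"]

-- str(x or dflt) for an optional dict value: missing key, None and "" all fall to dflt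
def bOrDefault (v : Option (Option String)) (dflt : String) : String :=
  match v with
  | some (some s) => if s.isEmpty then dflt else s
  | _ => dflt

-- _norm: (route, level) pair of one detail
def bNorm (detail : List (String × Option String)) : String × String :=
  let d := PySem.Dict.mk detail
  let r := PySem.Str.strip (bOrDefault (d.get? "route") "--")
  let l := PySem.Str.lower (PySem.Str.strip (bOrDefault (d.get? "result_level") "reject"))
  (if r.isEmpty then "--" else r, if bLevels.contains l then l else "reject")

-- the two nested while loops: i..j is the run of the leading route (takeWhile),
-- i = j restarts after it (dropWhile)
def bRuns : List (String × String) → List (String × List String)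
  | [] => []
  | (r, l) :: rest =>
      (r, l :: (rest.takeWhile (fun p => p.1 == r)).map Prod.snd)
        :: bRuns (rest.dropWhile (fun p => p.1 == r))
termination_by qs => qs.length
decreasing_by
  exact Nat.lt_succ_of_le (List.length_dropWhile_le _ _)

def route_decision_breakdown_py_alt (point_details : List (List (String × Option String))) : List (String × List (String × Int)) :=
  let pairs := PySem.List.sorted (point_details.map bNorm) (fun p => p.1) false
  (bRuns pairs).map
    (fun g => (g.1, bLevels.map (fun k => (k, (g.2.count k : Int)))))

-- ===== PRECONDITION & SPEC =====
def Spec_route_decision_breakdown_py (point_details : List (List (String × Option String))) (out : List (String × List (String × Int))) : Prop := out = route_decision_breakdown_py_alt point_details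
instance (point_details : List (List (String × Option String))) (out : List (String × List (String × Int))) : Decidable (Spec_route_decision_breakdown_py point_details out) := by unfold Spec_route_decision_breakdown_py; infer_instance

-- ===== CLAIM (what is proved, stated in full; the proofs are below) =====
def Claim_equal_route_decision_breakdown_py : Prop := ∀ (point_details : List (List (String × Option String))), Dom_route_decision_breakdown_py point_details → Spec_route_decision_breakdown_py point_details (route_decision_breakdown_py point_details)

-- ===== LEMMAS AND PROOFS =====

-- canonical form both programs are reduced to
def pvCanon (ps : List (String × String)) : List (String × List (String × Int)) :=
  (PySem.List.sorted (PySem.Set.ofList (ps.map Prod.fst)) (fun x => x) false).map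
    (fun r => (r, bLevels.map (fun k => (k, (ps.count (r, k) : Int)))))

-- ---- A-side: A's fold builds pvRows over the normalized pairs ----

def pvCdict (ps : List (String × String)) (r : String) : PySem.Dict String Int :=
  PySem.Dict.mk [("pass", (ps.count (r, "pass") : Int)), ("warn", (ps.count (r, "warn") : Int)),
                 ("reject", (ps.count (r, "reject") : Int)), ("skipped", (ps.count (r, "skipped") : Int))]

def pvRows (ps : List (String × String)) : PySem.Dict String (PySem.Dict String Int) :=
  PySem.Dict.mk ((PySem.Set.ofList (ps.map Prod.fst)).map (fun r => (r, pvCdict ps r)))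

theorem pvIf_mem (x : String) : (if bLevels.contains x then x else "reject") ∈ bLevels := by
  by_cases h : bLevels.contains x
  · rw [if_pos h]; exact List.mem_of_elem_eq_true h
  · rw [if_neg h]; simp [bLevels]

theorem pvCdict_fresh (ps : List (String × String)) (r : String)
    (h : r ∉ ps.map Prod.fst) : pvCdict ps r = pvDefault4 := by
  have hz : ∀ l : String, ps.count (r, l) = 0 := fun l =>
    List.count_eq_zero.mpr (fun hmem => h (List.mem_map.mpr ⟨(r, l), hmem, rfl⟩))
  simp [pvCdict, pvDefault4, hz]

theorem pvCdict_other (ps : List (String × String)) (p : String × String) (r : String)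
    (h : r ≠ p.1) : pvCdict (ps ++ [p]) r = pvCdict ps r := by
  have hz : ∀ l : String, ([p].count ((r, l) : String × String)) = 0 := fun l =>
    List.count_eq_zero.mpr (by
      intro hmem
      rcases List.mem_singleton.mp hmem with h'
      exact h (by rw [← h']))
  simp [pvCdict, List.count_append, hz]

theorem pvCdict_bump (ps : List (String × String)) (r l : String) (hl : l ∈ bLevels) :
    (pvCdict ps r).insert l ((pvCdict ps r).getD l 0 + 1) = pvCdict (ps ++ [(r, l)]) r := by
  have hc : ∀ l' : String, (ps ++ [(r, l)]).count ((r, l') : String × String)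
      = ps.count (r, l') + if l' = l then 1 else 0 := by
    intro l'
    rw [List.count_append]
    by_cases h : l' = l
    · subst h; simp
    · have hz : List.count ((r, l') : String × String) [(r, l)] = 0 := by
        refine List.count_eq_zero.mpr ?_
        intro hmem
        have he : ((r, l') : String × String) = (r, l) := List.mem_singleton.mp hmem
        injection he with _ h2
        exact h h2
      rw [hz, if_neg h, add_zero]
  fin_cases hl <;>
    simp [pvCdict, hc, PySem.Dict.insert, PySem.Dict.getD, PySem.Dict.get?]

theorem pvRows_keys (ps : List (String × String)) :
    (pvRows ps).keys = PySem.Set.ofList (ps.map Prod.fst) := by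
  simp only [pvRows, PySem.Dict.keys, List.map_map]
  rw [show ((fun x : String × PySem.Dict String Int => x.1) ∘ fun r => (r, pvCdict ps r)) = id from rfl, List.map_id]

theorem pvRows_getD (ps : List (String × String)) (r : String)
    (h : r ∈ PySem.Set.ofList (ps.map Prod.fst)) (dflt : PySem.Dict String Int) :
    (pvRows ps).getD r dflt = pvCdict ps r := by
  have hnd : (pvRows ps).keys.Nodup := by
    rw [pvRows_keys]; exact PySem.Set.nodup_ofList _
  have hmem : (r, pvCdict ps r) ∈ (pvRows ps).items := by
    show _ ∈ (PySem.Set.ofList (ps.map Prod.fst)).map _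
    exact List.mem_map.mpr ⟨r, h, rfl⟩
  exact PySem.Dict.getD_of_mem_items _ hmem hnd dflt

theorem pvCdict_contains (ps : List (String × String)) (r l : String) :
    (pvCdict ps r).contains l = bLevels.contains l := by
  simp [pvCdict, bLevels, PySem.Dict.contains, Bool.beq_eq_decide_eq, eq_comm]

theorem pvRows_contains (ps : List (String × String)) (r : String) :
    (pvRows ps).contains r = decide (r ∈ ps.map Prod.fst) := by
  by_cases hr : r ∈ ps.map Prod.fst
  · simp only [hr, decide_true]
    exact (PySem.Dict.contains_iff_mem_keys _ _).mpr (by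
      rw [pvRows_keys]; exact (PySem.Set.mem_ofList _ _).mpr hr)
  · simp only [hr, decide_false]
    refine Bool.not_eq_true _ |>.mp ?_
    intro hc
    exact hr ((PySem.Set.mem_ofList _ _).mp (pvRows_keys ps ▸ (PySem.Dict.contains_iff_mem_keys _ _).mp hc))

theorem pvCounts_at (ps : List (String × String)) (r : String) :
    ((pvRows ps).setdefault r pvDefault4).getD r pvDefault4 = pvCdict ps r := by
  by_cases hr : r ∈ ps.map Prod.fst
  · rw [PySem.Dict.setdefault_of_contains _ _ (by rw [pvRows_contains, decide_eq_true_eq]; exact hr)]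
    exact pvRows_getD ps r ((PySem.Set.mem_ofList _ _).mpr hr) _
  · rw [PySem.Dict.setdefault_of_not_contains _ _ (by rw [pvRows_contains, decide_eq_false_iff_not]; exact hr)]
    rw [PySem.Dict.getD_insert_self]
    exact (pvCdict_fresh ps r hr).symm

theorem pvSet_snoc (xs : List String) (x : String) :
    PySem.Set.ofList (xs ++ [x]) = PySem.Set.add (PySem.Set.ofList xs) x := by
  rw [PySem.Set.ofList_eq_foldl, PySem.Set.ofList_eq_foldl, List.foldl_append]
  rfl

theorem pvLevel_eq (ps : List (String × String)) (r l1 : String) :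
    (if (((pvRows ps).setdefault r pvDefault4).getD r pvDefault4).contains l1 = true
      then l1 else "reject") = (if bLevels.contains l1 then l1 else "reject") := by
  rw [pvCounts_at, pvCdict_contains]

theorem pvRows_step (ps : List (String × String)) (r l : String) (hl : l ∈ bLevels) :
    ((pvRows ps).setdefault r pvDefault4).insert r
      ((((pvRows ps).setdefault r pvDefault4).getD r pvDefault4).insert l
        ((((pvRows ps).setdefault r pvDefault4).getD r pvDefault4).getD l 0 + 1))
    = pvRows (ps ++ [(r, l)]) := by
  rw [pvCounts_at, pvCdict_bump ps r l hl]
  have hS' : PySem.Set.ofList ((ps ++ [(r, l)]).map Prod.fst)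
      = PySem.Set.add (PySem.Set.ofList (ps.map Prod.fst)) r := by
    rw [List.map_append]; exact pvSet_snoc _ _
  by_cases hr : r ∈ ps.map Prod.fst
  · have hcont : (pvRows ps).contains r = true := by
      rw [pvRows_contains, decide_eq_true_eq]; exact hr
    rw [PySem.Dict.setdefault_of_contains _ _ hcont]
    apply PySem.Dict.ext
    rw [PySem.Dict.items_insert_of_contains _ _ hcont]
    show (List.map _ _).map _ = _
    have hadd : PySem.Set.add (PySem.Set.ofList (ps.map Prod.fst)) r
        = PySem.Set.ofList (ps.map Prod.fst) := by
      have hm : r ∈ PySem.Set.ofList (ps.map Prod.fst) := (PySem.Set.mem_ofList _ _).mpr hr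
      simp [PySem.Set.add, hm]
    show _ = (PySem.Set.ofList ((ps ++ [(r, l)]).map Prod.fst)).map _
    rw [hS', hadd, List.map_map]
    refine List.map_congr_left ?_
    intro r' hr'
    by_cases h : r' = r
    · subst h; simp
    · simp only [Function.comp]
      rw [if_neg (by simp [h]), pvCdict_other ps (r, l) r' h]
  · have hcont : (pvRows ps).contains r = false := by
      rw [pvRows_contains, decide_eq_false_iff_not]; exact hr
    rw [PySem.Dict.setdefault_of_not_contains _ _ hcont]
    apply PySem.Dict.ext
    have hcont2 : ((pvRows ps).insert r pvDefault4).contains r = true :=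
      PySem.Dict.contains_insert_self _ _ _
    rw [PySem.Dict.items_insert_of_contains _ _ hcont2,
        PySem.Dict.items_insert_of_not_contains _ _ hcont]
    show ((List.map _ _) ++ [(r, pvDefault4)]).map _ = (PySem.Set.ofList ((ps ++ [(r, l)]).map Prod.fst)).map _
    have hadd : PySem.Set.add (PySem.Set.ofList (ps.map Prod.fst)) r
        = PySem.Set.ofList (ps.map Prod.fst) ++ [r] := by
      have hm : r ∉ PySem.Set.ofList (ps.map Prod.fst) :=
        fun hm => hr ((PySem.Set.mem_ofList (ps.map Prod.fst) r).mp hm)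
      simp [PySem.Set.add, hm]
    rw [hS', hadd]
    simp only [List.map_append, List.map_map, List.map_cons, List.map_nil]
    congr 1
    · refine List.map_congr_left ?_
      intro r' hr'
      have h : r' ≠ r := fun he => hr (he ▸ (PySem.Set.mem_ofList _ _).mp hr')
      simp only [Function.comp]
      rw [if_neg (by simp [h]), pvCdict_other ps (r, l) r' h]
    · rw [if_pos (by simp)]

-- A's loop-body route/level agree with bNorm's components
theorem pvNorm_route (d : List (String × Option String)) :
    (bNorm d).1 = (let route1 := PySem.Str.strip (match ((PySem.Dict.mk d).get? "route").join with
        | some v => if v = "" then "--" else v | none => "--");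
      if route1 = "" then "--" else route1) := by
  rcases h : (PySem.Dict.mk d).get? "route" with _ | (_ | v) <;>
    simp [bNorm, bOrDefault, h, Option.join, String.isEmpty_iff]

theorem pvNorm_level (d : List (String × Option String)) :
    (bNorm d).2 = (let l1 := PySem.Str.lower (PySem.Str.strip (match ((PySem.Dict.mk d).get? "result_level").join with
        | some v => if v = "" then "reject" else v | none => "reject"));
      if bLevels.contains l1 then l1 else "reject") := by
  rcases h : (PySem.Dict.mk d).get? "result_level" with _ | (_ | v) <;>
    simp [bNorm, bOrDefault, h, Option.join, String.isEmpty_iff]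

theorem pvStep (ps : List (String × String)) (detail : List (String × Option String)) :
    pvLoopBody (pvRows ps) detail = pvRows (ps ++ [bNorm detail]) := by
  unfold pvLoopBody
  simp only []
  rw [pvLevel_eq]
  rw [show ps ++ [bNorm detail] = ps ++ [((bNorm detail).1, (bNorm detail).2)] by simp]
  rw [pvNorm_route, pvNorm_level]
  exact pvRows_step ps _ _ (pvIf_mem _)

theorem pvFold (pds : List (List (String × Option String))) (ps : List (String × String)) :
    pds.foldl pvLoopBody (pvRows ps) = pvRows (ps ++ pds.map bNorm) := by
  induction pds generalizing ps with
  | nil => simp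
  | cons detail rest ih =>
      rw [List.foldl_cons, pvStep ps detail, ih]
      simp

theorem pvA_canon (pds : List (List (String × Option String))) :
    route_decision_breakdown_py pds = pvCanon (pds.map bNorm) := by
  have hfold := pvFold pds []
  rw [show pvRows [] = PySem.Dict.empty from rfl] at hfold
  simp only [List.nil_append] at hfold
  have key : ∀ d : PySem.Dict String (PySem.Dict String Int),
      d = pvRows (pds.map bNorm) →
      (PySem.List.sorted d.keys (fun x => x) false).map
        (fun route => (route, (d.getD route PySem.Dict.empty).items))
        = pvCanon (pds.map bNorm) := by
    rintro d rfl
    unfold pvCanon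
    rw [pvRows_keys]
    refine List.map_congr_left ?_
    intro r hr
    have hrS : r ∈ PySem.Set.ofList ((pds.map bNorm).map Prod.fst) :=
      (PySem.List.mem_sorted _ _ _ _).mp hr
    rw [pvRows_getD _ r hrS]
    simp [pvCdict, bLevels]
  exact key _ hfold

-- ---- B-side: runs of the by-route-sorted pair list give pvCanon ----

-- in a key-sorted list whose keys are all ≥ r, the run of key r is a prefix
theorem pvChunk (r : String) (rest : List (String × String))
    (hp : rest.Pairwise (fun a b => a.1 ≤ b.1)) (hge : ∀ y ∈ rest, r ≤ y.1) :
    rest.takeWhile (fun p => p.1 == r) = rest.filter (fun p => p.1 == r) ∧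
    rest.dropWhile (fun p => p.1 == r) = rest.filter (fun p => !(p.1 == r)) := by
  induction rest with
  | nil => simp
  | cons x t ih =>
      rcases List.pairwise_cons.mp hp with ⟨hx, ht⟩
      by_cases hxr : x.1 = r
      · have hge' : ∀ y ∈ t, r ≤ y.1 := fun y hy => le_trans (le_of_eq hxr.symm) (hx y hy)
        have := ih ht hge'
        simp [hxr, this.1, this.2]
      · have hlt : r < x.1 := lt_of_le_of_ne (hge x (by simp)) (fun h => hxr h.symm)
        have hnone : ∀ y ∈ t, ¬ (y.1 = r) := fun y hy hyr =>
          absurd (lt_of_lt_of_le hlt (hx y hy)) (by rw [hyr]; exact lt_irrefl r)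
        constructor
        · rw [List.takeWhile_cons_of_neg (by simp [hxr]), List.filter_cons_of_neg (by simp [hxr])]
          rw [List.filter_eq_nil_iff.mpr (by intro y hy; simpa using hnone y hy)]
        · rw [List.dropWhile_cons_of_neg (by simp [hxr]), List.filter_cons_of_pos (by simp [hxr])]
          rw [List.filter_eq_self.mpr (by intro y hy; simpa using hnone y hy)]

-- counting one level in the run = counting the pair in the whole list
theorem pvCntMapSnd (qs : List (String × String)) (r k : String) :
    ((qs.filter (fun p => p.1 == r)).map Prod.snd).count k = qs.count (r, k) := by
  induction qs with
  | nil => simp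
  | cons p t ih =>
      rcases p with ⟨a, b⟩
      by_cases ha : a = r
      · subst ha
        by_cases hb : b = k <;>
          simp [hb, ih]
      · have : ¬ ((a, b) = (r, k)) := by simp [ha]
        simp [ha, this, ih]

-- the three facts about bRuns of a key-sorted list
theorem pvRuns_spec : ∀ (n : Nat) (qs : List (String × String)), qs.length ≤ n →
    qs.Pairwise (fun a b => a.1 ≤ b.1) →
    ((bRuns qs).map Prod.fst).Pairwise (· < ·) ∧
    (∀ x, x ∈ (bRuns qs).map Prod.fst ↔ x ∈ qs.map Prod.fst) ∧
    (∀ g ∈ bRuns qs, g.2 = (qs.filter (fun p => p.1 == g.1)).map Prod.snd) := by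
  intro n
  induction n with
  | zero =>
      intro qs hlen _
      rw [List.length_eq_zero_iff.mp (Nat.le_zero.mp hlen)]
      simp [bRuns]
  | succ n ih =>
      intro qs hlen hp
      match qs with
      | [] => simp [bRuns]
      | (r, l) :: rest =>
        rcases List.pairwise_cons.mp hp with ⟨hx, ht⟩
        have hge : ∀ y ∈ rest, r ≤ y.1 := fun y hy => hx y hy
        obtain ⟨htake, hdrop⟩ := pvChunk r rest ht hge
        have hrw : bRuns ((r, l) :: rest)
            = (r, l :: (rest.filter (fun p => p.1 == r)).map Prod.snd)
              :: bRuns (rest.filter (fun p => !(p.1 == r))) := by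
          rw [bRuns, htake, hdrop]
        set rest' := rest.filter (fun p => !(p.1 == r)) with hrest'
        have hlen' : rest'.length ≤ n :=
          le_trans (List.length_filter_le _ _) (Nat.le_of_succ_le_succ hlen)
        have hp' : rest'.Pairwise (fun a b => a.1 ≤ b.1) := ht.filter _
        obtain ⟨hpw, hmem, hruns⟩ := ih rest' hlen' hp'
        have hkey_ne : ∀ x ∈ (bRuns rest').map Prod.fst, r < x := by
          intro x hxk
          obtain ⟨p, hpmem, hp1⟩ := List.mem_map.mp ((hmem x).mp hxk)
          obtain ⟨hpin, hpne⟩ := List.mem_filter.mp hpmem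
          have hpne' : ¬ (p.1 = r) := by simpa using hpne
          exact hp1 ▸ lt_of_le_of_ne (hge p hpin) (fun h => hpne' h.symm)
        refine ⟨?_, ?_, ?_⟩
        · rw [hrw]
          exact List.pairwise_cons.mpr ⟨by simpa using hkey_ne, hpw⟩
        · intro x
          rw [hrw]
          simp only [List.map_cons, List.mem_cons]
          constructor
          · rintro (rfl | hxk)
            · simp
            · obtain ⟨p, hpmem, hp1⟩ := List.mem_map.mp ((hmem x).mp hxk)
              exact Or.inr (hp1 ▸ List.mem_map.mpr ⟨p, (List.mem_filter.mp hpmem).1, rfl⟩)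
          · rintro (rfl | hxk)
            · exact Or.inl rfl
            · by_cases hxr : x = r
              · exact Or.inl hxr
              · obtain ⟨p, hpin, hp1⟩ := List.mem_map.mp hxk
                refine Or.inr ((hmem x).mpr (List.mem_map.mpr ⟨p, List.mem_filter.mpr ⟨hpin, by simp [hp1, hxr]⟩, hp1⟩))
        · intro g hg
          rw [hrw] at hg
          rcases List.mem_cons.mp hg with rfl | hg'
          · simp
          · have hne : g.1 ≠ r := by
              have : r < g.1 := hkey_ne g.1 (List.mem_map.mpr ⟨g, hg', rfl⟩)
              exact (ne_of_lt this).symm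
            rw [hruns g hg']
            congr 1
            rw [List.filter_cons_of_neg (by simpa using fun h : r = g.1 => hne h.symm)]
            rw [hrest', List.filter_filter]
            exact (List.filter_congr (fun p _ => by
              by_cases hpg : p.1 = g.1 <;> simp [hpg, hne])).symm

theorem pvB_canon (pds : List (List (String × Option String))) :
    route_decision_breakdown_py_alt pds = pvCanon (pds.map bNorm) := by
  unfold route_decision_breakdown_py_alt pvCanon
  set ps := pds.map bNorm with hps
  set sp := PySem.List.sorted ps (fun p => p.1) false with hsp
  have hperm : sp.Perm ps := PySem.List.sorted_perm ps (fun p => p.1) false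
  have hp : sp.Pairwise (fun a b => a.1 ≤ b.1) := PySem.List.sorted_pairwise ps (fun p => p.1)
  obtain ⟨hpw, hmem, hruns⟩ := pvRuns_spec sp.length sp le_rfl hp
  have hnodup : ((bRuns sp).map Prod.fst).Nodup := hpw.imp ne_of_lt
  have hmemS : ∀ x, x ∈ (bRuns sp).map Prod.fst ↔ x ∈ PySem.Set.ofList (ps.map Prod.fst) := by
    intro x
    rw [hmem x, PySem.Set.mem_ofList]
    exact ⟨fun h => (hperm.map Prod.fst).mem_iff.mp h, fun h => (hperm.map Prod.fst).mem_iff.mpr h⟩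
  have hpermS : ((bRuns sp).map Prod.fst).Perm (PySem.Set.ofList (ps.map Prod.fst)) :=
    (List.perm_ext_iff_of_nodup hnodup (PySem.Set.nodup_ofList _)).mpr hmemS
  have hkeys : PySem.List.sorted (PySem.Set.ofList (ps.map Prod.fst)) (fun x => x) false
      = (bRuns sp).map Prod.fst :=
    PySem.List.sorted_id_eq_of_perm_of_pairwise _ _ hpermS (hpw.imp le_of_lt)
  rw [hkeys, List.map_map]
  refine List.map_congr_left ?_
  intro g hg
  simp only [Function.comp]
  congr 1
  refine List.map_congr_left ?_
  intro k _
  congr 1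
  rw [hruns g hg, pvCntMapSnd]
  exact congrArg Int.ofNat (hperm.count_eq (g.1, k))

theorem route_decision_breakdown_py_spec : Claim_equal_route_decision_breakdown_py := by
  intro pds _
  show route_decision_breakdown_py pds = route_decision_breakdown_py_alt pds
  rw [pvA_canon, pvB_canon]
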